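-- pv_equiv track=rewrite | github.com/pypi-data/pypi-mirror-361 | packages/ascii-gradient-art/ascii_gradient_art-0.1.3-py3-none-any.whl/ascii_gradient_art/core/generator.py | render_ascii_art
-- ===== SOURCE A (Python) =====
-- def render_ascii_art(ascii_art_text, render_mode='outline'):
--     """
--     根据渲染模式处理 ASCII 艺术字。
--     - 'outline': 保持 pyfiglet 原始输出。
--     - 'fill': 将 ASCII 艺术字内部的空白区域填充为实心块字符。
--     """
--     if render_mode == 'outline':
--         return ascii_art_text
--     elif render_mode == 'fill':
--         lines = ascii_art_text.splitlines()
--         filled_lines = []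
--         for line in lines:
--             first_char_idx = -1
--             last_char_idx = -1
--             for i, char in enumerate(line):
--                 if char != ' ':
--                     if first_char_idx == -1:
--                         first_char_idx = i
--                     last_char_idx = i
--
--             if first_char_idx == -1:
--                 filled_lines.append(line)
--                 continue
--
--             filled_line = list(line)
--             for i in range(first_char_idx, last_char_idx + 1):
--                 if filled_line[i] == ' ':
--                     filled_line[i] = '█'
--             filled_lines.append(''.join(filled_line))
--         return '\n'.join(filled_lines)
--     else:
--         raise ValueError("Invalid render_mode. Must be 'outline' or 'fill'.")
-- ===== SOURCE B (Python) =====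
-- def render_ascii_art(ascii_art_text, render_mode='outline'):
--     if render_mode == 'outline':
--         return ascii_art_text
--     elif render_mode == 'fill':
--         return '\n'.join(_fill_line(line) for line in ascii_art_text.splitlines())
--     else:
--         raise ValueError("Invalid render_mode. Must be 'outline' or 'fill'.")
--
--
-- def _fill_line(line):
--     # single left-to-right pass: buffer each run of spaces as a count and flush
--     # it as blocks ('█') once a later non-space proves the run was interior,
--     # or as spaces at end-of-line / before the first non-space
--     parts = []
--     pending = 0
--     seen = False
--     for c in line:
--         if c == ' ':
--             pending += 1
--         else:
--             parts.append(('█' if seen else ' ') * pending)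
--             parts.append(c)
--             pending = 0
--             seen = True
--     parts.append(' ' * pending)
--     return ''.join(parts)
-- ===== Notes on version B (the rewrite author's own statement) =====
-- stated objective: alternative
-- what changed: Replaces A's two-stage per-line processing (enumerate scan to find first/last non-space indices, then an index-range pass mutating a char list) with a single left-to-right pass that run-length buffers each run of spaces and flushes it as blocks once a later non-space shows the run was interior, never computing any indices.
import Mathlib
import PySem

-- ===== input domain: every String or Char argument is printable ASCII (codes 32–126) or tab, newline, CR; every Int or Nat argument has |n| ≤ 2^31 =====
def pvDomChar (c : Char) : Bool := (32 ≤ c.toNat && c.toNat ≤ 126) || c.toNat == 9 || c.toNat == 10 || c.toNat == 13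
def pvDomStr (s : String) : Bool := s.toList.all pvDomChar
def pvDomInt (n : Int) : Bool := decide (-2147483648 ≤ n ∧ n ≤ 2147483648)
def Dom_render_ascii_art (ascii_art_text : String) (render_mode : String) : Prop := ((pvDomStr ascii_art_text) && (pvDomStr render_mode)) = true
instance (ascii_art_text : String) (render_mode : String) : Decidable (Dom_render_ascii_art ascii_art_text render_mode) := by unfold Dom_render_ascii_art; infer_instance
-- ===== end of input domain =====

-- B replaces A's two-stage per-line processing (first/last non-space index scan, then an
-- index-range mutation pass) with a single pass that run-length buffers space runs and
-- flushes them as blocks only when a later non-space proves the run interior (objective: alternative).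
-- Both programs raise ValueError for render_mode ∉ {'outline','fill'}; Pre_ excludes exactly those inputs.

-- ===== PORT A =====
-- the inner enumerate loop of A: the (first_char_idx, last_char_idx) update
def pvAStep (p : Int × Int) (ic : Int × Char) : Int × Int :=
  if ic.2 ≠ ' ' then (if p.1 = -1 then ic.1 else p.1, ic.1) else p

-- body of A's range loop: filled_line[i] = '█' if it is a space (the index is always in range here)
def pvAFill (fl : List Char) (i : Int) : List Char :=
  if PySem.List.pyGetD fl i ' ' == ' ' then PySem.List.pySetD fl i '█' else fl

def pvAFillLine (line : List Char) : List Char :=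
  let p := (PySem.List.enumerate line 0).foldl pvAStep (-1, -1)
  if p.1 = -1 then line
  else (PySem.List.pyRange p.1 (p.2 + 1) 1).foldl pvAFill line

def render_ascii_art (ascii_art_text : String) (render_mode : String) : String :=
  if render_mode = "outline" then ascii_art_text
  else if render_mode = "fill" then
    PySem.Str.join "\n"
      ((PySem.Str.splitlines ascii_art_text).map (fun line => String.ofList (pvAFillLine line.toList)))
  else ""  -- Python raises ValueError here; excluded by Pre_

-- ===== PORT B =====
-- _fill_line's loop body: state = (emitted chars, pending space-run length, seen non-space);
-- ('█' if seen else ' ') * pending is List.replicate, ''.join is the list append.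
def pvBStep (st : List Char × Nat × Bool) (c : Char) : List Char × Nat × Bool :=
  if c == ' ' then (st.1, st.2.1 + 1, st.2.2)
  else (st.1 ++ List.replicate st.2.1 (if st.2.2 then '█' else ' ') ++ [c], 0, true)

def pvBFillLine (line : List Char) : List Char :=
  let st := line.foldl pvBStep ([], 0, false)
  st.1 ++ List.replicate st.2.1 ' '

def render_ascii_art_alt (ascii_art_text : String) (render_mode : String) : String :=
  if render_mode = "outline" then ascii_art_text
  else if render_mode = "fill" then
    PySem.Str.join "\n"
      ((PySem.Str.splitlines ascii_art_text).map (fun line => String.ofList (pvBFillLine line.toList)))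
  else ""  -- Python raises ValueError here; excluded by Pre_

-- ===== PRECONDITION & SPEC =====
-- Pre_ excludes exactly the inputs where A raises ValueError (any render_mode other than the two accepted ones).
def Pre_render_ascii_art (ascii_art_text : String) (render_mode : String) : Prop :=
  render_mode = "outline" ∨ render_mode = "fill"
instance (ascii_art_text : String) (render_mode : String) : Decidable (Pre_render_ascii_art ascii_art_text render_mode) := by unfold Pre_render_ascii_art; infer_instance
def pvWitness_render_ascii_art : String × String := ("  ab c  d \n   \nx", "fill")

def Spec_render_ascii_art (ascii_art_text : String) (render_mode : String) (out : String) : Prop := out = render_ascii_art_alt ascii_art_text render_mode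
instance (ascii_art_text : String) (render_mode : String) (out : String) : Decidable (Spec_render_ascii_art ascii_art_text render_mode out) := by unfold Spec_render_ascii_art; infer_instance

-- ===== CLAIM (what is proved, stated in full; the proofs are below) =====
def Claim_equal_render_ascii_art : Prop := ∀ (ascii_art_text : String) (render_mode : String), Dom_render_ascii_art ascii_art_text render_mode → Pre_render_ascii_art ascii_art_text render_mode → Spec_render_ascii_art ascii_art_text render_mode (render_ascii_art ascii_art_text render_mode)

-- ===== LEMMAS AND PROOFS =====

theorem pvAStep_space_fold (l : List Char) (h : ∀ c ∈ l, c = ' ') :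
    ∀ (s : Int) (p : Int × Int), (PySem.List.enumerate l s).foldl pvAStep p = p := by
  induction l with
  | nil => intro s p; simp [PySem.List.enumerate_nil]
  | cons x xs ih =>
    intro s p
    have hx : x = ' ' := h x (by simp)
    simp [PySem.List.enumerate_cons, pvAStep, hx,
      ih (fun c hc => h c (by simp [hc]))]

theorem pvAStep_fst_fold (l : List Char) :
    ∀ (s : Int) (p : Int × Int), p.1 ≠ -1 →
      ((PySem.List.enumerate l s).foldl pvAStep p).1 = p.1 := by
  induction l with
  | nil => intro s p _; simp [PySem.List.enumerate_nil]
  | cons x xs ih =>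
    intro s p hp
    simp only [PySem.List.enumerate_cons, List.foldl_cons]
    by_cases hx : x = ' '
    · simpa [pvAStep, hx] using ih (s+1) p hp
    · have := ih (s+1) (if p.1 = -1 then s else p.1, s) (by simp [hp])
      simpa [pvAStep, hx, hp] using this

-- ends-with-non-space segment from a pinned first: last becomes the final index
theorem pvAStep_last_fold (l' : List Char) (w : Char) (hw : w ≠ ' ') :
    ∀ (s : Int) (p : Int × Int), p.1 ≠ -1 →
      ((PySem.List.enumerate (l' ++ [w]) s).foldl pvAStep p)
        = (p.1, s + l'.length) := by
  intro s p hp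
  rw [PySem.List.enumerate_append, List.foldl_append]
  have hfst := pvAStep_fst_fold l' s p hp
  rcases hq : (PySem.List.enumerate l' s).foldl pvAStep p with ⟨f, l0⟩
  rw [hq] at hfst
  simp at hfst
  subst hfst
  simp [PySem.List.enumerate_cons, PySem.List.enumerate_nil, pvAStep, hw, hp]

theorem pvAStep_core_fold (core : List Char) (hne : core ≠ [])
    (hh : core.head hne ≠ ' ') (hl : core.getLast hne ≠ ' ') (s : Int) (hs : 0 ≤ s) :
    (PySem.List.enumerate core s).foldl pvAStep (-1, -1)
      = (s, s + core.length - 1) := by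
  rcases core with _ | ⟨x, rest⟩
  · exact absurd rfl hne
  have hx : x ≠ ' ' := by simpa using hh
  rw [PySem.List.enumerate_cons]
  simp only [List.foldl_cons, pvAStep, if_pos hx]
  norm_num
  by_cases hrne : rest = []
  · subst hrne; simp [PySem.List.enumerate_nil]
  · have hw : rest.getLast hrne ≠ ' ' := by
      rw [← List.getLast_cons (a := x) hrne]; exact hl
    have hdecomp : rest = rest.dropLast ++ [rest.getLast hrne] :=
      (List.dropLast_append_getLast hrne).symm
    conv_lhs => rw [hdecomp]
    rw [pvAStep_last_fold _ _ hw (s+1) (s, s) (by simp; omega)]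
    have hlen : rest.dropLast.length = rest.length - 1 := by simp
    have hpos : 1 ≤ rest.length := List.length_pos_of_ne_nil hrne
    rw [hlen]
    have hcast : ((rest.length - 1 : Nat) : Int) = (rest.length : Int) - 1 := by
      push_cast [hpos]; ring
    rw [hcast]
    simp only [Prod.mk.injEq]
    exact ⟨trivial, by ring⟩

theorem pvFill_fold (b : List Char) :
    ∀ (a c : List Char),
      (PySem.List.pyRange a.length (a.length + b.length) 1).foldl pvAFill (a ++ b ++ c)
        = a ++ b.map (fun ch => if ch == ' ' then '█' else ch) ++ c := by
  induction b with
  | nil => intro a c; rw [PySem.List.pyRange_one_eq_nil (by simp)]; simp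
  | cons x xs ih =>
    intro a c
    rw [PySem.List.pyRange_one_cons (by push_cast [List.length_cons]; omega)]
    have hstep : pvAFill (a ++ x :: xs ++ c) (a.length : Int)
        = (a ++ [if x == ' ' then '█' else x]) ++ xs ++ c := by
      by_cases hx : x = ' '
      · simp [pvAFill, PySem.List.pyGetD_natCast, List.getD, hx, PySem.List.pySetD_natCast]
      · simp [pvAFill, PySem.List.pyGetD_natCast, List.getD, hx]
    have hb1 : ((a.length : Int) + 1) = (((a ++ [if x == ' ' then '█' else x]).length : Int)) := by
      simp
    have hb2 : ((a.length : Int) + ((x :: xs).length : Int))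
        = (((a ++ [if x == ' ' then '█' else x]).length : Int) + (xs.length : Int)) := by
      simp; omega
    simp only [List.foldl_cons, hstep, hb1, hb2, ih]
    by_cases hx : x = ' ' <;> simp [hx]

-- an all-space list is a replicate of spaces
theorem pvAllSpace_replicate (l : List Char) (h : ∀ c ∈ l, c = ' ') :
    l = List.replicate l.length ' ' :=
  List.eq_replicate_of_mem h

-- B's machine over an all-space run only grows the pending counter
theorem pvBStep_space_fold (l : List Char) (h : ∀ c ∈ l, c = ' ') :
    ∀ (acc : List Char) (p : Nat) (b : Bool),
      l.foldl pvBStep (acc, p, b) = (acc, p + l.length, b) := by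
  induction l with
  | nil => intro acc p b; simp
  | cons x xs ih =>
    intro acc p b
    have hx : x = ' ' := h x (by simp)
    simp only [List.foldl_cons, pvBStep, hx]
    rw [if_pos (by simp)]
    rw [ih (fun c hc => h c (by simp [hc]))]
    simp; omega

-- B's machine with seen=true over a run ending in a non-space: flushes everything as blocks
theorem pvBStep_core_fold (m : List Char) (hne : m ≠ []) (hl : m.getLast? ≠ some ' ') :
    ∀ (acc : List Char) (p : Nat),
      m.foldl pvBStep (acc, p, true)
        = (acc ++ List.replicate p '█' ++ m.map (fun ch => if ch == ' ' then '█' else ch), 0, true) := by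
  induction m with
  | nil => exact absurd rfl hne
  | cons x xs ih =>
    intro acc p
    by_cases hxs : xs = []
    · subst hxs
      have hx : x ≠ ' ' := by simpa using hl
      simp [pvBStep, hx]
    · have hl' : xs.getLast? ≠ some ' ' := by
        rcases xs with _ | ⟨y, ys⟩
        · exact absurd rfl hxs
        · rwa [List.getLast?_cons_cons] at hl
      simp only [List.foldl_cons]
      by_cases hx : x = ' '
      · rw [show pvBStep (acc, p, true) x = (acc, p + 1, true) by simp [pvBStep, hx]]
        rw [ih hxs hl' acc (p + 1)]
        simp [hx, List.replicate_succ' (n := p)]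
      · rw [show pvBStep (acc, p, true) x
            = (acc ++ List.replicate p '█' ++ [x], 0, true) by simp [pvBStep, hx]]
        rw [ih hxs hl' _ 0]
        simp [hx]

theorem pvDecomp (l : List Char) (h : ¬∀ c ∈ l, c = ' ') :
    ∃ sp core sp2 : List Char, l = sp ++ core ++ sp2 ∧ (∀ c ∈ sp, c = ' ')
      ∧ (∀ c ∈ sp2, c = ' ') ∧ core ≠ [] ∧ core.head? ≠ some ' '
      ∧ core.getLast? ≠ some ' ' := by
  have hdn : l.dropWhile (· == ' ') ≠ [] := by
    intro hx
    rw [List.dropWhile_eq_nil_iff] at hx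
    exact h (fun c hc => by simpa using hx c hc)
  have hY : (l.dropWhile (· == ' ')).reverse.dropWhile (· == ' ') ≠ [] := by
    intro hx
    rw [List.dropWhile_eq_nil_iff] at hx
    have hh := List.head_dropWhile_not (fun x => x == ' ') hdn
    have := hx _ (List.mem_reverse.mpr (List.head_mem hdn))
    simp_all
  have hsplit : ((l.dropWhile (· == ' ')).reverse.dropWhile (· == ' ')).reverse
      ++ ((l.dropWhile (· == ' ')).reverse.takeWhile (· == ' ')).reverse
      = l.dropWhile (· == ' ') := by
    rw [← List.reverse_append, List.takeWhile_append_dropWhile, List.reverse_reverse]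
  have hcne : ((l.dropWhile (· == ' ')).reverse.dropWhile (· == ' ')).reverse ≠ [] := by
    simpa using hY
  refine ⟨l.takeWhile (· == ' '),
    ((l.dropWhile (· == ' ')).reverse.dropWhile (· == ' ')).reverse,
    ((l.dropWhile (· == ' ')).reverse.takeWhile (· == ' ')).reverse,
    ?_, ?_, ?_, hcne, ?_, ?_⟩
  · rw [List.append_assoc, hsplit, List.takeWhile_append_dropWhile]
  · intro c hc; simpa using List.mem_takeWhile_imp hc
  · intro c hc; simpa using List.mem_takeWhile_imp (List.mem_reverse.mp hc)
  · rw [← List.head?_append_of_ne_nil _ hcne, hsplit,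
      List.head?_eq_some_head hdn]
    have := List.head_dropWhile_not (fun x => x == ' ') hdn
    simp_all
  · rw [← List.head?_reverse, List.reverse_reverse,
      List.head?_eq_some_head hY]
    have := List.head_dropWhile_not (fun x => x == ' ') hY
    simp_all

theorem pvFillLine_eq (l : List Char) : pvAFillLine l = pvBFillLine l := by
  by_cases hall : ∀ c ∈ l, c = ' '
  · have hB : pvBFillLine l = l := by
      unfold pvBFillLine
      rw [pvBStep_space_fold l hall [] 0 false]
      simpa using (pvAllSpace_replicate l hall).symm
    simp [pvAFillLine, pvAStep_space_fold l hall 0 (-1, -1), hB]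
  · obtain ⟨sp, core, sp2, rfl, hspall, hsp2all, hcne, hh?, hl?⟩ := pvDecomp l hall
    have hchead : core.head hcne ≠ ' ' := fun heq => hh? (by rw [List.head?_eq_some_head hcne, heq])
    have hclast : core.getLast hcne ≠ ' ' := fun heq => hl? (by rw [List.getLast?_eq_some_getLast hcne, heq])
    have hscan : (PySem.List.enumerate (sp ++ core ++ sp2) 0).foldl pvAStep (-1, -1)
        = ((sp.length : Int), (sp.length : Int) + core.length - 1) := by
      rw [PySem.List.enumerate_append, PySem.List.enumerate_append,
        List.foldl_append, List.foldl_append,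
        pvAStep_space_fold sp hspall 0 (-1, -1),
        pvAStep_core_fold core hcne hchead hclast _ (by positivity),
        pvAStep_space_fold sp2 hsp2all]
      simp
    have hA : pvAFillLine (sp ++ core ++ sp2)
        = sp ++ core.map (fun ch => if ch == ' ' then '█' else ch) ++ sp2 := by
      unfold pvAFillLine
      rw [hscan]
      rw [if_neg (by omega)]
      have : ((sp.length : Int) + core.length - 1) + 1 = (sp.length : Int) + core.length := by ring
      rw [this, pvFill_fold]
    have hB : pvBFillLine (sp ++ core ++ sp2)
        = sp ++ core.map (fun ch => if ch == ' ' then '█' else ch) ++ sp2 := by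
      rcases core with _ | ⟨x, rest⟩
      · exact absurd rfl hcne
      have hx : x ≠ ' ' := by simpa using hh?
      unfold pvBFillLine
      rw [List.foldl_append, List.foldl_append,
        pvBStep_space_fold sp hspall [] 0 false]
      simp only [List.foldl_cons]
      rw [show pvBStep ([], 0 + sp.length, false) x
          = (List.replicate sp.length ' ' ++ [x], 0, true) by simp [pvBStep, hx]]
      rw [← pvAllSpace_replicate sp hspall]
      by_cases hrne : rest = []
      · subst hrne
        rw [List.foldl_nil, pvBStep_space_fold sp2 hsp2all]
        simp [hx, ← pvAllSpace_replicate sp2 hsp2all]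
      · have hl' : rest.getLast? ≠ some ' ' := by
          rcases rest with _ | ⟨y, ys⟩
          · exact absurd rfl hrne
          · rwa [List.getLast?_cons_cons] at hl?
        rw [pvBStep_core_fold rest hrne hl' _ 0,
          pvBStep_space_fold sp2 hsp2all]
        simp [hx, ← pvAllSpace_replicate sp2 hsp2all]
    rw [hA, hB]

-- ===== VERDICT (by name: the statement is the Claim_ definition above) =====
theorem render_ascii_art_spec : Claim_equal_render_ascii_art := by
  intro t m _ hpre
  unfold Spec_render_ascii_art render_ascii_art render_ascii_art_alt
  rcases hpre with h | h <;> simp [h, pvFillLine_eq]
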